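-- pv_equiv track=rewrite | github.com/cyberLaVoy/kattis | python3/diceGame.py | possibilityCount
-- ===== SOURCE A (Python) =====
-- def possibilityCount(dice):
--     possibilityCount = {}
--     low1 = dice[0]
--     low2 = dice[2]
--     high1 = dice[1]
--     high2 = dice[3]
--     for i in range(low1, high1+1):
--         for j in range(low2, high2+1):
--             if i+j not in possibilityCount:
--                 possibilityCount[i+j] = 1
--             else:
--                 possibilityCount[i+j] += 1
--     return possibilityCount
-- ===== SOURCE B (Python) =====
-- def possibilityCount(dice):
--     low1 = dice[0]
--     high1 = dice[1]
--     low2 = dice[2]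
--     high2 = dice[3]
--     if high1 < low1 or high2 < low2:
--         return {}
--     counts = {}
--     for s in range(low1 + low2, high1 + high2 + 1):
--         counts[s] = min(high1, s - low2) - max(low1, s - high2) + 1
--     return counts
-- ===== Notes on version B (the rewrite author's own statement) =====
-- stated objective: alternative
-- what changed: Instead of A's double loop over every (i,j) pair counting into a dict, B returns {} for empty ranges and otherwise makes a single pass over the distinct sums low1+low2..high1+high2, computing each multiplicity in O(1) with the interval-overlap formula min(high1, s-low2) - max(low1, s-high2) + 1.
import Mathlib
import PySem

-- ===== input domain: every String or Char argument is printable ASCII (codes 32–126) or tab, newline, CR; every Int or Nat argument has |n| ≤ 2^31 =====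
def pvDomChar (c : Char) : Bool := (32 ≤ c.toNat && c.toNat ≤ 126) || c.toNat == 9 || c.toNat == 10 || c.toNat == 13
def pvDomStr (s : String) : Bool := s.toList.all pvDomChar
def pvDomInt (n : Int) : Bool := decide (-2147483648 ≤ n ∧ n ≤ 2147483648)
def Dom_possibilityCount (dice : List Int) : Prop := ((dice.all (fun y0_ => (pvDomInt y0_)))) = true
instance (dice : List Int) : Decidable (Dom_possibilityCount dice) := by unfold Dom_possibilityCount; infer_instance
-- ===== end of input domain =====

-- B replaces A's double loop over all (i,j) pairs by a single pass over the distinct sums,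
-- computing each multiplicity with the interval-overlap formula min(high1, s-low2) - max(low1, s-high2) + 1.

-- ===== PORT A =====
def possibilityCount (dice : List Int) : List (Int × Int) :=
  let low1 := PySem.List.pyGetD dice 0 0
  let low2 := PySem.List.pyGetD dice 2 0
  let high1 := PySem.List.pyGetD dice 1 0
  let high2 := PySem.List.pyGetD dice 3 0
  let d : PySem.Dict Int Int :=
    (PySem.List.pyRange low1 (high1 + 1) 1).foldl (fun d i =>
      (PySem.List.pyRange low2 (high2 + 1) 1).foldl (fun d j =>
        if !d.contains (i + j) then d.insert (i + j) 1
        else d.insert (i + j) (d.getD (i + j) 0 + 1)) d)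
      PySem.Dict.empty
  d.items

-- ===== PORT B =====
def possibilityCount_alt (dice : List Int) : List (Int × Int) :=
  let low1 := PySem.List.pyGetD dice 0 0
  let high1 := PySem.List.pyGetD dice 1 0
  let low2 := PySem.List.pyGetD dice 2 0
  let high2 := PySem.List.pyGetD dice 3 0
  if high1 < low1 ∨ high2 < low2 then []
  else
    let counts : PySem.Dict Int Int :=
      (PySem.List.pyRange (low1 + low2) (high1 + high2 + 1) 1).foldl (fun d s =>
        d.insert s (min high1 (s - low2) - max low1 (s - high2) + 1))
        PySem.Dict.empty
    counts.items

-- ===== PRECONDITION & SPEC =====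
-- Pre_ excludes exactly the inputs with fewer than 4 elements, on which A raises IndexError.
def Pre_possibilityCount (dice : List Int) : Prop := 4 ≤ dice.length
instance (dice : List Int) : Decidable (Pre_possibilityCount dice) := by unfold Pre_possibilityCount; infer_instance
def pvWitness_possibilityCount : List Int := [1, 2, 1, 2]

def Spec_possibilityCount (dice : List Int) (out : List (Int × Int)) : Prop := out = possibilityCount_alt dice
instance (dice : List Int) (out : List (Int × Int)) : Decidable (Spec_possibilityCount dice out) := by unfold Spec_possibilityCount; infer_instance

-- ===== CLAIM (what is proved, stated in full; the proofs are below) =====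
def Claim_equal_possibilityCount : Prop := ∀ (dice : List Int), Dom_possibilityCount dice → Pre_possibilityCount dice → Spec_possibilityCount dice (possibilityCount dice)

-- ===== LEMMAS AND PROOFS =====

-- The list of all sums i+j that A's double loop visits, in visiting order.
def pvBlock (i l2 h2 : Int) : List Int := (PySem.List.pyRange l2 (h2 + 1) 1).map (fun j => i + j)
def pvSums (l1 h1 l2 h2 : Int) : List Int := (PySem.List.pyRange l1 (h1 + 1) 1).flatMap (fun i => pvBlock i l2 h2)

theorem pv_map_add_pyRange (c a b : Int) :
    (PySem.List.pyRange a b 1).map (fun j => c + j) = PySem.List.pyRange (c + a) (c + b) 1 := by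
  rw [PySem.List.pyRange_one, PySem.List.pyRange_one, List.map_map]
  have h : c + b - (c + a) = b - a := by ring
  rw [h]
  exact List.map_congr_left (fun k _ => by simp [Function.comp]; ring)

theorem pv_block_eq (i l2 h2 : Int) :
    pvBlock i l2 h2 = PySem.List.pyRange (i + l2) (i + h2 + 1) 1 := by
  unfold pvBlock
  rw [pv_map_add_pyRange]
  congr 1
  ring

-- A's dictionary is the Counter of pvSums.
theorem pv_A_dict (l1 h1 l2 h2 : Int) :
    ((PySem.List.pyRange l1 (h1 + 1) 1).foldl (fun d i =>
      (PySem.List.pyRange l2 (h2 + 1) 1).foldl (fun d j =>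
        if !d.contains (i + j) then d.insert (i + j) 1
        else d.insert (i + j) (d.getD (i + j) 0 + 1)) d)
      PySem.Dict.empty)
    = PySem.Dict.counter (pvSums l1 h1 l2 h2) := by
  have hbody : ∀ i : Int, (fun (d : PySem.Dict Int Int) (j : Int) =>
      if !d.contains (i + j) then d.insert (i + j) 1
      else d.insert (i + j) (d.getD (i + j) 0 + 1))
      = fun d j => d.insert (i + j) (d.getD (i + j) 0 + 1) := by
    intro i
    funext d j
    by_cases h : d.contains (i + j) = true
    · simp [h]
    · simp [Bool.not_eq_true] at h
      simp [h, PySem.Dict.getD_of_not_contains d 0 h]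
  rw [← PySem.Dict.foldl_insert_getD_add_one_eq_counter]
  unfold pvSums pvBlock
  rw [List.flatMap]
  rw [List.foldl_flatten]
  rw [List.foldl_map]
  exact PySem.List.foldl_congr_mem _ _ _ _ (fun acc i _ => by
    rw [hbody i, List.foldl_map])

theorem pv_sums_nil (l1 h1 l2 h2 : Int) (h : h1 < l1 ∨ h2 < l2) :
    pvSums l1 h1 l2 h2 = [] := by
  rcases h with h | h
  · unfold pvSums
    rw [PySem.List.pyRange_one_eq_nil (by omega)]
    rfl
  · unfold pvSums pvBlock
    rw [PySem.List.pyRange_one_eq_nil (by omega)]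
    simp

-- Multiplicity of a sum s in one inner block.
theorem pv_count_block (s i l2 h2 : Int) :
    (pvBlock i l2 h2).count s = if l2 ≤ s - i ∧ s - i ≤ h2 then 1 else 0 := by
  rw [pv_block_eq]
  by_cases h : l2 ≤ s - i ∧ s - i ≤ h2
  · rw [if_pos h]
    exact List.count_eq_one_of_mem (PySem.List.nodup_pyRange_one _ _)
      ((PySem.List.mem_pyRange_one).2 (by omega))
  · rw [if_neg h]
    exact List.count_eq_zero_of_not_mem (fun hm => h (by
      have := (PySem.List.mem_pyRange_one).1 hm
      omega))

-- Multiplicity of a sum s among all visited sums: the overlap formula.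
theorem pv_count_sums (l1 l2 h2 s : Int) : ∀ n : Nat,
    (pvSums l1 (l1 + n) l2 h2).count s
      = (min (l1 + n) (s - l2) + 1 - max l1 (s - h2)).toNat := by
  intro n
  induction n with
  | zero =>
    unfold pvSums
    rw [show (l1 + ((0 : Nat) : Int) + 1) = l1 + 1 by push_cast; ring]
    rw [show PySem.List.pyRange l1 (l1 + 1) 1 = [l1] from PySem.List.pyRange_one_singleton l1]
    simp only [List.flatMap_cons, List.flatMap_nil, List.append_nil]
    rw [pv_count_block]
    split_ifs with h <;> omega
  | succ n ih =>
    unfold pvSums at ih ⊢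
    rw [show (l1 + ((n + 1 : Nat) : Int) + 1) = (l1 + (n : Int) + 1) + 1 by push_cast; ring]
    rw [PySem.List.pyRange_one_succ_right (by omega)]
    rw [List.flatMap_append, List.count_append]
    simp only [List.flatMap_cons, List.flatMap_nil, List.append_nil]
    rw [ih, pv_count_block]
    split_ifs with h <;> (push_cast; omega)

theorem pv_update_of_subset (s : PySem.Set Int) (xs : List Int) (h : ∀ x ∈ xs, x ∈ s) :
    PySem.Set.update s xs = s := by
  rw [PySem.Set.update_eq_append_filter]
  have hnil : List.filter (fun y => !PySem.Set.contains s y) (PySem.Set.ofList xs) = [] := by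
    rw [List.filter_eq_nil_iff]
    intro y hy
    have hys : y ∈ s := h y ((PySem.Set.mem_ofList xs y).1 hy)
    have hc : PySem.Set.contains s y = true := (PySem.Set.contains_iff s y).2 hys
    simp only [hc]
    decide
  rw [hnil, List.append_nil]

-- The distinct sums, in first-appearance order, are the contiguous range low1+low2 .. high1+high2.
theorem pv_set_sums (l1 l2 h2 : Int) (hl2 : l2 ≤ h2) : ∀ n : Nat,
    PySem.Set.ofList (pvSums l1 (l1 + n) l2 h2)
      = PySem.List.pyRange (l1 + l2) (l1 + n + h2 + 1) 1 := by
  intro n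
  induction n with
  | zero =>
    unfold pvSums
    rw [show (l1 + ((0 : Nat) : Int) + 1) = l1 + 1 by push_cast; ring]
    rw [show PySem.List.pyRange l1 (l1 + 1) 1 = [l1] from PySem.List.pyRange_one_singleton l1]
    simp only [List.flatMap_cons, List.flatMap_nil, List.append_nil]
    rw [pv_block_eq, PySem.Set.ofList_eq_self_of_nodup _ (PySem.List.nodup_pyRange_one _ _)]
    congr 1 <;> push_cast <;> ring
  | succ n ih =>
    unfold pvSums at ih ⊢
    rw [show (l1 + ((n + 1 : Nat) : Int) + 1) = (l1 + (n : Int) + 1) + 1 by push_cast; ring]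
    rw [PySem.List.pyRange_one_succ_right (by omega)]
    rw [List.flatMap_append]
    simp only [List.flatMap_cons, List.flatMap_nil, List.append_nil]
    rw [PySem.Set.ofList_append, ih, pv_block_eq]
    rw [PySem.List.pyRange_one_append (l1 + (n : Int) + 1 + l2) (l1 + (n : Int) + h2 + 1)
      (l1 + (n : Int) + 1 + h2 + 1) (by omega) (by omega)]
    rw [PySem.Set.update_append]
    rw [pv_update_of_subset (PySem.List.pyRange (l1 + l2) (l1 + (n : Int) + h2 + 1) 1)
      (PySem.List.pyRange (l1 + (n : Int) + 1 + l2) (l1 + (n : Int) + h2 + 1) 1)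
      (fun x hx => by
        have := (PySem.List.mem_pyRange_one).1 hx
        exact (PySem.List.mem_pyRange_one).2 (by omega))]
    rw [PySem.Set.update_eq_append_of_disjoint _ _ (PySem.List.nodup_pyRange_one _ _)
      (fun x hx hxs => by
        have h1 := (PySem.List.mem_pyRange_one).1 hx
        have h2' := (PySem.List.mem_pyRange_one).1 hxs
        omega)]
    rw [← PySem.List.pyRange_one_append (l1 + l2) (l1 + (n : Int) + h2 + 1)
      (l1 + (n : Int) + 1 + h2 + 1) (by omega) (by omega)]
    congr 1
    push_cast
    ring

-- The core equality, over the four extracted bounds.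
theorem pv_core (l1 h1 l2 h2 : Int) :
    ((PySem.List.pyRange l1 (h1 + 1) 1).foldl (fun d i =>
      (PySem.List.pyRange l2 (h2 + 1) 1).foldl (fun d j =>
        if !d.contains (i + j) then d.insert (i + j) 1
        else d.insert (i + j) (d.getD (i + j) 0 + 1)) d)
      (PySem.Dict.empty : PySem.Dict Int Int)).items
    = (if h1 < l1 ∨ h2 < l2 then []
       else ((PySem.List.pyRange (l1 + l2) (h1 + h2 + 1) 1).foldl (fun d s =>
          d.insert s (min h1 (s - l2) - max l1 (s - h2) + 1))
          (PySem.Dict.empty : PySem.Dict Int Int)).items) := by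
  rw [pv_A_dict]
  by_cases hne : h1 < l1 ∨ h2 < l2
  · -- one of the two ranges is empty: both sides are empty
    rw [if_pos hne, pv_sums_nil l1 h1 l2 h2 hne]
    rfl
  · -- both ranges nonempty
    rw [if_neg hne]
    have h1l : l1 ≤ h1 := by omega
    have h2l : l2 ≤ h2 := by omega
    have hn : h1 = l1 + ((h1 - l1).toNat : Int) := by omega
    have hset : PySem.Set.ofList (pvSums l1 h1 l2 h2)
        = PySem.List.pyRange (l1 + l2) (h1 + h2 + 1) 1 := by
      rw [hn]; exact pv_set_sums l1 l2 h2 h2l (h1 - l1).toNat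
    have hcount : ∀ s : Int, (pvSums l1 h1 l2 h2).count s
        = (min h1 (s - l2) + 1 - max l1 (s - h2)).toNat := by
      intro s
      rw [hn]; exact pv_count_sums l1 l2 h2 s (h1 - l1).toNat
    rw [PySem.Dict.items_counter, hset]
    rw [PySem.Dict.items_foldl_insert_fresh _ (fun s => s)
      (fun s => min h1 (s - l2) - max l1 (s - h2) + 1) PySem.Dict.empty
      (fun a _ => by simp [PySem.Dict.contains_empty])
      (by simpa using PySem.List.nodup_pyRange_one (l1 + l2) (h1 + h2 + 1))]
    have hemp : (PySem.Dict.empty : PySem.Dict Int Int).items = [] := rfl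
    rw [hemp, List.nil_append]
    exact List.map_congr_left (fun s hs => by
      have hb := (PySem.List.mem_pyRange_one).1 hs
      rw [hcount s]
      congr 1
      omega)

-- ===== VERDICT (by name: the statement is the Claim_ definition above) =====
theorem possibilityCount_spec : Claim_equal_possibilityCount := by
  intro dice _ _
  unfold Spec_possibilityCount possibilityCount possibilityCount_alt
  exact pv_core (PySem.List.pyGetD dice 0 0) (PySem.List.pyGetD dice 1 0)
    (PySem.List.pyGetD dice 2 0) (PySem.List.pyGetD dice 3 0)
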